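-- pv_equiv track=rewrite | github.com/demchenko-eg/Algorithms | H10/t10_09_e3533.py | f
-- ===== SOURCE A (Python) =====
-- def f(index, score, time, used, missions, n, k, min_time):
--     if score >= k:
--         return min(min_time, time)
--     for i in range (n):
--         if not used[i]:
--             used[i] = True
--             min_time = f(index, score + missions[i][0], time + missions[i][1], used, missions, n, k, min_time)
--             used[i] = False
--     return min_time
-- ===== SOURCE B (Python) =====
-- def f(index, score, time, used, missions, n, k, min_time):
--     if score >= k:
--         return min(min_time, time)
--     avail = [missions[i] for i in range(n) if not used[i]]
--     m = len(avail)
--     size = 1 << m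
--     reach = [False] * size
--     reach[0] = True
--     best = None
--     for S in range(size):
--         if not reach[S]:
--             continue
--         sc = score
--         tm = 0
--         for i in range(m):
--             if (S >> i) & 1:
--                 sc += avail[i][0]
--                 tm += avail[i][1]
--         if sc >= k:
--             if best is None or tm < best:
--                 best = tm
--         else:
--             for i in range(m):
--                 if not (S >> i) & 1:
--                     reach[S | (1 << i)] = True
--     if best is None:
--         return min_time
--     return min(min_time, time + best)
-- ===== Notes on version B (the rewrite author's own statement) =====
-- stated objective: alternative
-- what changed: A explores all orderings of the unused missions (factorial backtracking over a mutable used array, threading min_time); B extracts the unused missions once and runs a bitmask reachability DP over subsets (a subset is reachable iff it can be built while the score stays below k), taking the minimum total time over reachable subsets that meet the score threshold.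
import Mathlib
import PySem

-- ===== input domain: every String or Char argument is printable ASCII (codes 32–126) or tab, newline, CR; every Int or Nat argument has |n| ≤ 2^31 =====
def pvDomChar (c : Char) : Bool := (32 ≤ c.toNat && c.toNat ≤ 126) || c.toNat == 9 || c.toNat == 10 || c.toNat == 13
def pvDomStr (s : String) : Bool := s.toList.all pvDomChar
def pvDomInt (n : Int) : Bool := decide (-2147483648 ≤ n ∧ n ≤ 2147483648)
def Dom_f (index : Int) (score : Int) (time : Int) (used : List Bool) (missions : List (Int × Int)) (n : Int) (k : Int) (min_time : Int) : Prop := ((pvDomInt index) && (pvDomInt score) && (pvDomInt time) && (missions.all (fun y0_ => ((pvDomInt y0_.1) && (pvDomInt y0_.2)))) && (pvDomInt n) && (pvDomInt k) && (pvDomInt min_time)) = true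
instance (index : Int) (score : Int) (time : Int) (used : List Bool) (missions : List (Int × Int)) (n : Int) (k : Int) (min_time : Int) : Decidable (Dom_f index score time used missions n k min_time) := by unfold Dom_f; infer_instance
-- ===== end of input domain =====

-- B replaces A's backtracking over orderings of the unused missions by a bitmask
-- subset-reachability DP; A temporarily mutates `used` but always restores it, so the
-- caller observes no net mutation, and B mutates nothing.

-- ===== PORT A =====
-- Python's recursion always terminates because every recursive call turns one False entry of
-- `used` into True; the port makes this explicit with fuel `used.length + 1`, which is never
-- exhausted (recursion depth ≤ number of False entries + 1).
def fA (fuel : Nat) (index : Int) (score : Int) (time : Int) (used : List Bool) (missions : List (Int × Int)) (n : Int) (k : Int) (min_time : Int) : Int :=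
  match fuel with
  | 0 => min_time
  | fuel + 1 =>
    if k ≤ score then min min_time time
    else
      (PySem.List.pyRange 0 n 1).foldl (fun mt i =>
        if !(PySem.List.pyGet? used i).getD true then
          -- used[i] = True; recurse; used[i] = False (net effect on `used`: none)
          let p := (PySem.List.pyGet? missions i).getD (0, 0)
          fA fuel index (score + p.1) (time + p.2) (used.set i.toNat true) missions n k mt
        else mt) min_time

def f (index : Int) (score : Int) (time : Int) (used : List Bool) (missions : List (Int × Int)) (n : Int) (k : Int) (min_time : Int) : Int :=
  fA (used.length + 1) index score time used missions n k min_time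

-- ===== PORT B =====
-- literal port of Source B; loop masks S come from range(2**m) so S ≥ 0 and `S.toNat` is exact
def f_alt (index : Int) (score : Int) (time : Int) (used : List Bool) (missions : List (Int × Int)) (n : Int) (k : Int) (min_time : Int) : Int :=
  if k ≤ score then min min_time time
  else
    let avail := ((PySem.List.pyRange 0 n 1).filter (fun i => !(PySem.List.pyGet? used i).getD true)).map
        (fun i => (PySem.List.pyGet? missions i).getD (0, 0))
    let m := avail.length
    let size := 2 ^ m
    let reach0 := (List.replicate size false).set 0 true
    let res := (PySem.List.pyRange 0 (size : Int) 1).foldl (fun (st : List Bool × Option Int) S =>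
      if (st.1.getD S.toNat false) = false then st
      else
        let sctm := (PySem.List.pyRange 0 (m : Int) 1).foldl (fun (p : Int × Int) i =>
            if (S.toNat >>> i.toNat) &&& 1 = 1 then
              let a := (PySem.List.pyGet? avail i).getD (0, 0)
              (p.1 + a.1, p.2 + a.2)
            else p) (score, 0)
        if k ≤ sctm.1 then
          (st.1, match st.2 with
                 | none => some sctm.2
                 | some b => if sctm.2 < b then some sctm.2 else some b)
        else
          ((PySem.List.pyRange 0 (m : Int) 1).foldl (fun r i =>
              if (S.toNat >>> i.toNat) &&& 1 = 1 then r
              else r.set (S.toNat ||| (1 <<< i.toNat)) true) st.1, st.2)) (reach0, none)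
    match res.2 with
    | none => min_time
    | some b => min min_time (time + b)

-- ===== PRECONDITION & SPEC =====
-- Pre_f holds exactly where the Python A returns: A raises IndexError when (with score < k and
-- 0 < n) n exceeds len(used), or some unused index i < n has no mission (i ≥ len(missions)).
def Pre_f (index : Int) (score : Int) (time : Int) (used : List Bool) (missions : List (Int × Int)) (n : Int) (k : Int) (min_time : Int) : Prop :=
  k ≤ score ∨ n ≤ 0 ∨
    (n ≤ (used.length : Int) ∧
      ∀ i : Nat, i < n.toNat → used.getD i true = false → i < missions.length)
instance (index : Int) (score : Int) (time : Int) (used : List Bool) (missions : List (Int × Int)) (n : Int) (k : Int) (min_time : Int) : Decidable (Pre_f index score time used missions n k min_time) := by unfold Pre_f; infer_instance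

def pvWitness_f : Int × Int × Int × List Bool × (List (Int × Int)) × Int × Int × Int :=
  (0, 0, 0, [false, true], [(2, 3)], 1, 1, 100)

def Spec_f (index : Int) (score : Int) (time : Int) (used : List Bool) (missions : List (Int × Int)) (n : Int) (k : Int) (min_time : Int) (out : Int) : Prop := out = f_alt index score time used missions n k min_time
instance (index : Int) (score : Int) (time : Int) (used : List Bool) (missions : List (Int × Int)) (n : Int) (k : Int) (min_time : Int) (out : Int) : Decidable (Spec_f index score time used missions n k min_time out) := by unfold Spec_f; infer_instance

-- ===== CLAIM (what is proved, stated in full; the proofs are below) =====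
def Claim_equal_f : Prop := ∀ (index : Int) (score : Int) (time : Int) (used : List Bool) (missions : List (Int × Int)) (n : Int) (k : Int) (min_time : Int), Dom_f index score time used missions n k min_time → Pre_f index score time used missions n k min_time → Spec_f index score time used missions n k min_time (f index score time used missions n k min_time)

-- ===== LEMMAS AND PROOFS =====

-- ---- generic option-minimum toolkit ----
def optMin2 (a b : Option Int) : Option Int :=
  match a, b with
  | none, b => b
  | a, none => a
  | some x, some y => some (min x y)

def optMinL (l : List Int) : Option Int := l.foldl (fun a x => optMin2 a (some x)) none

def combineMin (mt t : Int) (d : Option Int) : Int :=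
  match d with
  | none => mt
  | some d => min mt (t + d)

theorem optMin2_assoc (a b c : Option Int) : optMin2 (optMin2 a b) c = optMin2 a (optMin2 b c) := by
  cases a <;> cases b <;> cases c <;> simp [optMin2, min_assoc]

theorem foldl_optMin2 (l : List Int) (acc : Option Int) :
    l.foldl (fun a x => optMin2 a (some x)) acc = optMin2 acc (optMinL l) := by
  induction l generalizing acc with
  | nil => cases acc <;> simp [optMinL, optMin2]
  | cons y ys ih =>
    simp only [optMinL, List.foldl_cons]
    rw [ih, ih (optMin2 none (some y)), ← optMin2_assoc]
    rfl

theorem optMinL_append (l l' : List Int) :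
    optMinL (l ++ l') = optMin2 (optMinL l) (optMinL l') := by
  simp only [optMinL, List.foldl_append]
  exact foldl_optMin2 l' _

theorem optMinL_map_add (c : Int) (l : List Int) :
    (optMinL l).map (c + ·) = optMinL (l.map (c + ·)) := by
  induction l using List.reverseRecOn with
  | nil => rfl
  | append_singleton ys y ih =>
    rw [List.map_append, optMinL_append, optMinL_append, ← ih]
    cases h : optMinL ys with
    | none => simp [optMin2, optMinL]
    | some w =>
      simp only [optMin2, optMinL, List.foldl_cons, List.foldl_nil, Option.map_some, min_def]
      split_ifs <;> simp <;> omega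

theorem optMinL_flatMap {α : Type} (l : List α) (g : α → List Int) :
    optMinL (l.flatMap g) = l.foldl (fun a x => optMin2 a (optMinL (g x))) none := by
  induction l using List.reverseRecOn with
  | nil => rfl
  | append_singleton ys y ih =>
    rw [List.flatMap_append, optMinL_append, ih, List.foldl_append]
    simp [List.flatMap_cons]

theorem optMinL_none_iff (l : List Int) : optMinL l = none ↔ l = [] := by
  induction l using List.reverseRecOn with
  | nil => simp [optMinL]
  | append_singleton ys y ih =>
    rw [optMinL_append]
    cases optMinL ys <;> simp [optMin2, optMinL]

theorem optMinL_some_iff (l : List Int) (v : Int) :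
    optMinL l = some v ↔ v ∈ l ∧ ∀ x ∈ l, v ≤ x := by
  induction l using List.reverseRecOn generalizing v with
  | nil => simp [optMinL]
  | append_singleton ys y ih =>
    rw [optMinL_append]
    cases h : optMinL ys with
    | none =>
      rw [optMinL_none_iff] at h; subst h
      simp [optMin2, optMinL]
      constructor
      · rintro rfl; simp
      · rintro ⟨rfl, h2⟩; rfl
    | some w =>
      have hw := (ih w).mp h
      have hy : optMinL [y] = some y := rfl
      rw [hy]
      simp only [optMin2, Option.some.injEq]
      constructor
      · rintro rfl
        refine ⟨?_, ?_⟩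
        · by_cases hwy : w ≤ y
          · rw [min_eq_left hwy]; exact List.mem_append.mpr (Or.inl hw.1)
          · rw [min_eq_right (le_of_not_ge hwy)]; simp
        · intro x hx
          rcases List.mem_append.mp hx with hx | hx
          · exact le_trans (min_le_left _ _) (hw.2 x hx)
          · simp at hx; subst hx; exact min_le_right _ _
      · rintro ⟨hv1, hv2⟩
        have h1 : v ≤ w := hv2 w (List.mem_append.mpr (Or.inl hw.1))
        have h2 : v ≤ y := hv2 y (by simp)
        have h3 : w ≤ v ∨ y ≤ v := by
          rcases List.mem_append.mp hv1 with hx | hx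
          · exact Or.inl (hw.2 v hx)
          · simp at hx; subst hx; exact Or.inr le_rfl
        rw [min_def]; split_ifs <;> omega

theorem optMinL_congr_mem (l l' : List Int) (h : ∀ x, x ∈ l ↔ x ∈ l') :
    optMinL l = optMinL l' := by
  cases h1 : optMinL l with
  | none =>
    rw [optMinL_none_iff] at h1; subst h1
    symm; rw [optMinL_none_iff]
    cases l' with
    | nil => rfl
    | cons a as => exact absurd ((h a).mpr (by simp)) (by simp)
  | some v =>
    rw [optMinL_some_iff] at h1
    symm; rw [optMinL_some_iff]
    exact ⟨(h v).mp h1.1, fun x hx => h1.2 x ((h x).mpr hx)⟩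

theorem combineMin_combineMin (mt t : Int) (a b : Option Int) :
    combineMin (combineMin mt t a) t b = combineMin mt t (optMin2 a b) := by
  cases a <;> cases b <;> simp only [combineMin, optMin2, min_def] <;> split_ifs <;> omega

theorem combineMin_shift (mt t c : Int) (d : Option Int) :
    combineMin mt (t + c) d = combineMin mt t (d.map (c + ·)) := by
  cases d <;> simp [combineMin] <;> ring_nf

theorem foldl_combineMin (l : List Int) (t : Int) (c : Int → Option Int) (mt : Int) (acc : Option Int) :
    l.foldl (fun m i => combineMin m t (c i)) (combineMin mt t acc)
      = combineMin mt t (l.foldl (fun a i => optMin2 a (c i)) acc) := by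
  induction l generalizing acc with
  | nil => rfl
  | cons y ys ih =>
    simp only [List.foldl_cons]
    rw [combineMin_combineMin, ih]

-- ---- shared notions ----
def pgetM (missions : List (Int × Int)) (i : Int) : Int × Int :=
  (PySem.List.pyGet? missions i).getD (0, 0)

def freeIdxs (used : List Bool) (n : Int) : List Int :=
  (PySem.List.pyRange 0 n 1).filter (fun i => !(PySem.List.pyGet? used i).getD true)

-- generic: filtering with the predicate weakened exactly at one member j = erasing j
theorem filter_step {α : Type} [DecidableEq α] (l : List α) (hnd : l.Nodup) (p q : α → Bool)
    (j : α) (hj : j ∈ l) (hpj : p j = true)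
    (hq : ∀ x ∈ l, q x = (p x && !(x == j))) :
    l.filter q = (l.filter p).erase j := by
  induction l with
  | nil => cases hj
  | cons a as ih =>
    have hnd' := (List.nodup_cons.mp hnd)
    by_cases haj : a = j
    · subst haj
      have hqa : q a = false := by rw [hq a (by simp)]; simp
      have hfilt : as.filter q = as.filter p := by
        apply List.filter_congr
        intro x hx
        rw [hq x (by simp [hx])]
        have : x ≠ a := fun h => hnd'.1 (h ▸ hx)
        simp [this]
      rw [List.filter_cons_of_neg (by simp [hqa]), List.filter_cons_of_pos (by simp [hpj]), hfilt]
      simp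
    · have hj' : j ∈ as := by
        cases hj with
        | head => exact absurd rfl haj
        | tail _ h => exact h
      have hqa : q a = p a := by rw [hq a (by simp)]; simp [haj]
      have ihh := ih hnd'.2 hj' (fun x hx => hq x (by simp [hx]))
      cases hpa : p a with
      | true =>
        rw [List.filter_cons_of_pos (by simp [hqa, hpa]), List.filter_cons_of_pos (by simp [hpa]),
          List.erase_cons_tail (by simp [haj])]
        rw [ihh]
      | false =>
        rw [List.filter_cons_of_neg (by simp [hqa, hpa]), List.filter_cons_of_neg (by simp [hpa]), ihh]

-- ---- A-side: ordered search over the list of free indices ----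
def bestL (missions : List (Int × Int)) (k : Int) (L : List Int) (s : Int) : Option Int :=
  if k ≤ s then some 0
  else
    L.attach.foldl (fun acc x =>
      optMin2 acc ((bestL missions k (L.erase x.1) (s + (pgetM missions x.1).1)).map
        ((pgetM missions x.1).2 + ·))) none
termination_by L.length
decreasing_by
  have := List.length_erase_of_mem x.2
  have := List.length_pos_of_mem x.2
  omega

theorem mem_freeIdxs (used : List Bool) (n : Int) (j : Int) (hj : j ∈ freeIdxs used n) :
    0 ≤ j ∧ j < n ∧ used[j.toNat]? = some false := by
  have h := List.mem_filter.mp hj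
  have hr := (PySem.List.mem_pyRange_one).mp h.1
  have h2 := h.2
  rw [PySem.List.pyGet?_of_nonneg _ hr.1] at h2
  refine ⟨hr.1, hr.2, ?_⟩
  cases hg : used[j.toNat]? with
  | none => rw [hg] at h2; simp at h2
  | some b => rw [hg] at h2; cases b <;> simp_all

theorem freeIdxs_set (used : List Bool) (n : Int) (j : Int) (hj : j ∈ freeIdxs used n) :
    freeIdxs (used.set j.toNat true) n = (freeIdxs used n).erase j := by
  obtain ⟨hj0, hjn, hjg⟩ := mem_freeIdxs used n j hj
  have hjlen : j.toNat < used.length := by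
    by_contra h
    rw [List.getElem?_eq_none (by omega)] at hjg
    cases hjg
  apply filter_step _ (PySem.List.nodup_pyRange_one 0 n) _ _ j (List.mem_filter.mp hj).1
    (List.mem_filter.mp hj).2
  intro x hx
  have hx0 : 0 ≤ x := ((PySem.List.mem_pyRange_one).mp hx).1
  by_cases hxj : x = j
  · subst hxj
    rw [PySem.List.pyGet?_of_nonneg _ hx0, List.getElem?_set_self hjlen]
    simp
  · have : x.toNat ≠ j.toNat := by omega
    rw [PySem.List.pyGet?_of_nonneg _ hx0, List.getElem?_set_ne (Ne.symm this),
      ← PySem.List.pyGet?_of_nonneg _ hx0]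
    simp [hxj]

theorem fA_eq_bestL (missions : List (Int × Int)) (n k : Int) (fuel : Nat) :
    ∀ (used : List Bool) (index score time mt : Int),
      (freeIdxs used n).length < fuel →
      fA fuel index score time used missions n k mt
        = combineMin mt time (bestL missions k (freeIdxs used n) score) := by
  induction fuel with
  | zero => intro used index score time mt h; omega
  | succ fuel ih =>
    intro used index score time mt h
    by_cases hks : k ≤ score
    · rw [bestL]
      simp only [fA, hks, if_pos, combineMin]
      omega
    · have hbody :
          (PySem.List.pyRange 0 n 1).foldl (fun mt i =>
            if !(PySem.List.pyGet? used i).getD true then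
              let p := (PySem.List.pyGet? missions i).getD (0, 0)
              fA fuel index (score + p.1) (time + p.2) (used.set i.toNat true) missions n k mt
            else mt) mt
          = (freeIdxs used n).foldl (fun mt i =>
              fA fuel index (score + (pgetM missions i).1) (time + (pgetM missions i).2)
                (used.set i.toNat true) missions n k mt) mt := by
        rw [freeIdxs, List.foldl_filter]
        rfl
      have hstep : ∀ (mt' : Int), ∀ i ∈ freeIdxs used n,
          fA fuel index (score + (pgetM missions i).1) (time + (pgetM missions i).2)
            (used.set i.toNat true) missions n k mt'
          = combineMin mt' time
              ((bestL missions k ((freeIdxs used n).erase i) (score + (pgetM missions i).1)).map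
                ((pgetM missions i).2 + ·)) := by
        intro mt' i hi
        have hlen : ((freeIdxs (used.set i.toNat true) n)).length < fuel := by
          rw [freeIdxs_set used n i hi]
          have := List.length_erase_of_mem hi
          have := List.length_pos_of_mem hi
          omega
        rw [ih (used.set i.toNat true) index _ _ mt' hlen, freeIdxs_set used n i hi,
          combineMin_shift]
      have hfold := foldl_combineMin (freeIdxs used n) time
        (fun i => (bestL missions k ((freeIdxs used n).erase i) (score + (pgetM missions i).1)).map
          ((pgetM missions i).2 + ·)) mt none
      rw [show combineMin mt time none = mt from rfl] at hfold
      rw [show fA (fuel + 1) index score time used missions n k mt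
            = (PySem.List.pyRange 0 n 1).foldl (fun mt i =>
                if !(PySem.List.pyGet? used i).getD true then
                  let p := (PySem.List.pyGet? missions i).getD (0, 0)
                  fA fuel index (score + p.1) (time + p.2) (used.set i.toNat true) missions n k mt
                else mt) mt from by rw [fA]; rw [if_neg hks],
        hbody,
        PySem.List.foldl_congr_mem _ _
          (fun mt' i => combineMin mt' time
            ((bestL missions k ((freeIdxs used n).erase i) (score + (pgetM missions i).1)).map
              ((pgetM missions i).2 + ·))) mt
          (fun mt' i hi => hstep mt' i hi),
        hfold, bestL]
      rw [if_neg hks,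
        List.foldl_attach (l := freeIdxs used n)
          (f := fun acc i => optMin2 acc
            ((bestL missions k ((freeIdxs used n).erase i) (score + (pgetM missions i).1)).map
              ((pgetM missions i).2 + ·))) (b := none)]

theorem freeIdxs_length_le (used : List Bool) (n : Int) :
    (freeIdxs used n).length ≤ used.length := by
  have hnd : (freeIdxs used n).Nodup :=
    List.Nodup.filter _ (PySem.List.nodup_pyRange_one 0 n)
  have hmapnd : ((freeIdxs used n).map Int.toNat).Nodup := by
    apply List.Nodup.map_on _ hnd
    intro x hx y hy hxy
    have hx0 := (mem_freeIdxs used n x hx).1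
    have hy0 := (mem_freeIdxs used n y hy).1
    omega
  have hlt : ∀ x ∈ (freeIdxs used n).map Int.toNat, x < used.length := by
    intro x hx
    obtain ⟨j, hj, rfl⟩ := List.mem_map.mp hx
    have := (mem_freeIdxs used n j hj).2.2
    by_contra h
    rw [List.getElem?_eq_none (by omega)] at this
    cases this
  have hsub : ((freeIdxs used n).map Int.toNat).toFinset ⊆ Finset.range used.length := by
    intro x hx; simp only [List.mem_toFinset] at hx
    simp [hlt x hx]
  have := Finset.card_le_card hsub
  simpa [List.toFinset_card_of_nodup hmapnd] using this

-- ---- relabelling: original indices → positions 0..m-1 of avail ----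
theorem bestL_map (ms avail : List (Int × Int)) (k : Int) (φ : Int → Int) :
    ∀ (J : List Int) (s : Int),
      (∀ a ∈ J, ∀ b ∈ J, φ a = φ b → a = b) →
      (∀ i ∈ J, pgetM ms (φ i) = pgetM avail i) →
      bestL ms k (J.map φ) s = bestL avail k J s := by
  have hme : ∀ (J : List Int) (i : Int), i ∈ J →
      (∀ a ∈ J, ∀ b ∈ J, φ a = φ b → a = b) →
      (J.map φ).erase (φ i) = (J.erase i).map φ := by
    intro J
    induction J with
    | nil => intro i hi; cases hi
    | cons a as ihm =>
      intro i hi hinj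
      by_cases hai : a = i
      · subst hai
        simp [List.erase_cons_head]
      · have hia : i ∈ as := by
          cases hi with
          | head => exact absurd rfl hai
          | tail _ h => exact h
        have hphi : φ a ≠ φ i := fun h =>
          hai (hinj a (by simp) i (by simp [hia]) h)
        rw [List.map_cons, List.erase_cons_tail (by simp [hphi]),
          List.erase_cons_tail (by simp [hai]), List.map_cons,
          ihm i hia (fun x hx y hy => hinj x (by simp [hx]) y (by simp [hy]))]
  have main : ∀ (len : Nat) (J : List Int) (s : Int), J.length ≤ len →
      (∀ a ∈ J, ∀ b ∈ J, φ a = φ b → a = b) →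
      (∀ i ∈ J, pgetM ms (φ i) = pgetM avail i) →
      bestL ms k (J.map φ) s = bestL avail k J s := by
    intro len
    induction len with
    | zero =>
      intro J s hlen _ _
      have : J = [] := List.eq_nil_of_length_eq_zero (by omega)
      subst this
      rw [show List.map φ [] = [] from rfl, bestL, bestL]
      by_cases hks : k ≤ s <;> simp [hks]
    | succ len ihl =>
      intro J s hlen hinj hpay
      rw [bestL, bestL]
      by_cases hks : k ≤ s
      · rw [if_pos hks, if_pos hks]
      · rw [if_neg hks, if_neg hks,
          List.foldl_attach (l := J.map φ)
            (f := fun acc i => optMin2 acc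
              ((bestL ms k ((J.map φ).erase i) (s + (pgetM ms i).1)).map ((pgetM ms i).2 + ·)))
            (b := none),
          List.foldl_attach (l := J)
            (f := fun acc i => optMin2 acc
              ((bestL avail k (J.erase i) (s + (pgetM avail i).1)).map ((pgetM avail i).2 + ·)))
            (b := none),
          List.foldl_map]
        apply PySem.List.foldl_congr_mem
        intro acc i hi
        rw [hme J i hi hinj, hpay i hi,
          ihl (J.erase i) (s + (pgetM avail i).1)
            (by have := List.length_erase_of_mem hi; have := List.length_pos_of_mem hi; omega)
            (fun x hx y hy => hinj x (List.mem_of_mem_erase hx) y (List.mem_of_mem_erase hy))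
            (fun x hx => hpay x (List.mem_of_mem_erase hx))]
  intro J s hinj hpay
  exact main J.length J s le_rfl hinj hpay

-- ---- mask world over avail ----
def maskSc (avail : List (Int × Int)) (m S : Nat) : Int :=
  ∑ i ∈ Finset.range m, if S.testBit i then (pgetM avail (i : Int)).1 else 0

def maskTm (avail : List (Int × Int)) (m S : Nat) : Int :=
  ∑ i ∈ Finset.range m, if S.testBit i then (pgetM avail (i : Int)).2 else 0

def freeBitsN (m U : Nat) : List Nat := (List.range m).filter (fun i => !U.testBit i)

theorem freeBitsN_or (m U i : Nat) (him : i < m) (hfree : U.testBit i = false) :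
    freeBitsN m (U ||| 1 <<< i) = (freeBitsN m U).erase i := by
  apply filter_step _ (List.nodup_range) _ _ i (List.mem_range.mpr him) (by simp [hfree])
  intro x hx
  rw [Nat.one_shiftLeft]
  by_cases hxi : x = i
  · subst hxi; simp [Nat.testBit_or, Nat.testBit_two_pow]
  · simp [Nat.testBit_or, Nat.testBit_two_pow, hxi, Ne.symm hxi]

def termsM (avail : List (Int × Int)) (k score : Int) (m : Nat) (U : Nat) : List Nat :=
  if k ≤ score + maskSc avail m U then [U]
  else
    (freeBitsN m U).attach.flatMap (fun x =>
      termsM avail k score m (U ||| 1 <<< x.1))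
termination_by (freeBitsN m U).length
decreasing_by
  rw [freeBitsN_or m U x.1 (by have := x.2; simp [freeBitsN] at this; exact this.1)
    (by have := x.2; simp [freeBitsN] at this; exact this.2)]
  have hx := x.2
  have := List.length_erase_of_mem hx
  have := List.length_pos_of_mem hx
  omega

-- free bits of U as the Int list bestL consumes
def freeInts (m U : Nat) : List Int := (freeBitsN m U).map (fun i : Nat => (i : Int))

theorem maskSum_or (v : Nat → Int) (m U i : Nat) (him : i < m) (hfree : U.testBit i = false) :
    (∑ j ∈ Finset.range m, if (U ||| 1 <<< i).testBit j then v j else 0)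
      = (∑ j ∈ Finset.range m, if U.testBit j then v j else 0) + v i := by
  have hfun : ∀ j ∈ Finset.range m,
      (if (U ||| 1 <<< i).testBit j then v j else 0)
        = (if U.testBit j then v j else 0) + (if j = i then v i else 0) := by
    intro j _
    rw [Nat.one_shiftLeft]
    by_cases hji : j = i
    · subst hji; simp [Nat.testBit_or, Nat.testBit_two_pow, hfree]
    · simp [Nat.testBit_or, Nat.testBit_two_pow, hji, Ne.symm hji]
  rw [Finset.sum_congr rfl hfun, Finset.sum_add_distrib]
  simp [Finset.sum_ite_eq' (Finset.range m) i (fun _ => v i), him]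

theorem maskSc_or (avail : List (Int × Int)) (m U i : Nat) (him : i < m)
    (hfree : U.testBit i = false) :
    maskSc avail m (U ||| 1 <<< i) = maskSc avail m U + (pgetM avail (i : Int)).1 := by
  exact maskSum_or _ m U i him hfree

theorem maskTm_or (avail : List (Int × Int)) (m U i : Nat) (him : i < m)
    (hfree : U.testBit i = false) :
    maskTm avail m (U ||| 1 <<< i) = maskTm avail m U + (pgetM avail (i : Int)).2 := by
  exact maskSum_or _ m U i him hfree

theorem bestL_eq_termsM (avail : List (Int × Int)) (k score : Int) (m : Nat) :
    ∀ (U : Nat),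
      bestL avail k (freeInts m U) (score + maskSc avail m U)
        = optMinL ((termsM avail k score m U).map (fun S => maskTm avail m S - maskTm avail m U)) := by
  have main : ∀ (len : Nat) (U : Nat), (freeBitsN m U).length ≤ len →
      bestL avail k (freeInts m U) (score + maskSc avail m U)
        = optMinL ((termsM avail k score m U).map (fun S => maskTm avail m S - maskTm avail m U)) := by
    intro len
    induction len with
    | zero =>
      intro U hlen
      have hnil : freeBitsN m U = [] := List.eq_nil_of_length_eq_zero (by omega)
      rw [bestL, termsM]
      by_cases hks : k ≤ score + maskSc avail m U
      · rw [if_pos hks, if_pos hks]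
        simp [optMinL, optMin2]
      · have hfi : freeInts m U = [] := by rw [freeInts, hnil]; rfl
        rw [if_neg hks, if_neg hks, hfi, hnil]
        simp [optMinL]
    | succ len ihl =>
      intro U hlen
      rw [bestL, termsM]
      by_cases hks : k ≤ score + maskSc avail m U
      · rw [if_pos hks, if_pos hks]
        simp [optMinL, optMin2]
      · rw [if_neg hks, if_neg hks,
          List.foldl_attach (l := freeInts m U)
            (f := fun acc i => optMin2 acc
              ((bestL avail k ((freeInts m U).erase i) (score + maskSc avail m U + (pgetM avail i).1)).map
                ((pgetM avail i).2 + ·)))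
            (b := none),
          List.map_flatMap, optMinL_flatMap,
          List.foldl_attach (l := freeBitsN m U)
            (f := fun acc i => optMin2 acc
              (optMinL ((termsM avail k score m (U ||| 1 <<< i)).map
                (fun S => maskTm avail m S - maskTm avail m U))))
            (b := none),
          show freeInts m U = (freeBitsN m U).map (fun i : Nat => (i : Int)) from by rw [freeInts],
          List.foldl_map]
        apply PySem.List.foldl_congr_mem
        intro acc i hi
        have him : i < m := by
          have := List.mem_filter.mp hi
          exact List.mem_range.mp this.1
        have hfree : U.testBit i = false := by
          have := (List.mem_filter.mp hi).2
          simpa using this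
        have herase : (List.map (fun i : Nat => (i : Int)) (freeBitsN m U)).erase ((i : Nat) : Int)
            = freeInts m (U ||| 1 <<< i) := by
          rw [freeInts, freeBitsN_or m U i him hfree,
            List.map_erase (fun a b h => by omega)]
        have hlen' : (freeBitsN m (U ||| 1 <<< i)).length ≤ len := by
          rw [freeBitsN_or m U i him hfree]
          have := List.length_erase_of_mem hi
          have := List.length_pos_of_mem hi
          omega
        have hsc : score + maskSc avail m U + (pgetM avail (i : Int)).1
            = score + maskSc avail m (U ||| 1 <<< i) := by
          rw [maskSc_or avail m U i him hfree]; ring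
        rw [herase, hsc, ihl _ hlen', optMinL_map_add, List.map_map]
        congr 2
        apply List.map_congr_left
        intro S _
        have := maskTm_or avail m U i him hfree
        simp only [Function.comp]
        omega
  intro U
  exact main (freeBitsN m U).length U le_rfl

-- ---- reachability characterisation of termsM 0 ----
inductive ReachP (avail : List (Int × Int)) (k score : Int) (m : Nat) : Nat → Prop
  | zero : ReachP avail k score m 0
  | step (U i : Nat) : ReachP avail k score m U → i < m → U.testBit i = false →
      score + maskSc avail m U < k → ReachP avail k score m (U ||| 1 <<< i)

theorem ReachP_lt (avail : List (Int × Int)) (k score : Int) (m : Nat) (S : Nat)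
    (h : ReachP avail k score m S) : S < 2 ^ m := by
  induction h with
  | zero => exact Nat.two_pow_pos m
  | step U i _ him _ _ ih =>
    refine Nat.or_lt_two_pow ih ?_
    rw [Nat.one_shiftLeft]
    exact Nat.pow_lt_pow_right (by omega) him

theorem mem_termsM_zero (avail : List (Int × Int)) (k score : Int) (m : Nat) (S : Nat) :
    S ∈ termsM avail k score m 0 ↔
      ReachP avail k score m S ∧ k ≤ score + maskSc avail m S := by
  constructor
  · have main : ∀ (len U : Nat), (freeBitsN m U).length ≤ len → ReachP avail k score m U →
        ∀ S ∈ termsM avail k score m U, ReachP avail k score m S ∧ k ≤ score + maskSc avail m S := by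
      intro len
      induction len with
      | zero =>
        intro U hlen hU S hS
        rw [termsM] at hS
        by_cases hks : k ≤ score + maskSc avail m U
        · rw [if_pos hks] at hS; simp at hS; subst hS; exact ⟨hU, hks⟩
        · rw [if_neg hks] at hS
          have hnil : freeBitsN m U = [] := List.eq_nil_of_length_eq_zero (by omega)
          rw [hnil] at hS; simp at hS
      | succ len ihl =>
        intro U hlen hU S hS
        rw [termsM] at hS
        by_cases hks : k ≤ score + maskSc avail m U
        · rw [if_pos hks] at hS; simp at hS; subst hS; exact ⟨hU, hks⟩
        · rw [if_neg hks] at hS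
          obtain ⟨x, -, hx⟩ := List.mem_flatMap.mp hS
          have hi := x.2
          have him : x.1 < m := List.mem_range.mp (List.mem_filter.mp hi).1
          have hfree : U.testBit x.1 = false := by
            have := (List.mem_filter.mp hi).2; simpa using this
          have hstep := ReachP.step U x.1 hU him hfree (by omega)
          refine ihl (U ||| 1 <<< x.1) ?_ hstep S hx
          rw [freeBitsN_or m U x.1 him hfree]
          have := List.length_erase_of_mem hi
          have := List.length_pos_of_mem hi
          omega
    exact fun h => main (freeBitsN m 0).length 0 le_rfl ReachP.zero S h
  · rintro ⟨hS, hks⟩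
    have hsub : ∀ U, ReachP avail k score m U →
        ∀ x ∈ termsM avail k score m U, x ∈ termsM avail k score m 0 := by
      intro U hU
      induction hU with
      | zero => exact fun x hx => hx
      | step U i hU him hfree hlt ih =>
        intro x hx
        apply ih
        rw [termsM, if_neg (by omega)]
        apply List.mem_flatMap.mpr
        have hifree : i ∈ freeBitsN m U := by
          simp [freeBitsN, List.mem_filter, List.mem_range, him, hfree]
        exact ⟨⟨i, hifree⟩, List.mem_attach _ _, hx⟩
    apply hsub S hS
    rw [termsM, if_pos hks]
    simp

-- ---- B-side: the mask loop computes the minimum over reachable terminal masks ----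
theorem shift_and_one (c i : Nat) : ((c >>> i) &&& 1 = 1) ↔ c.testBit i = true := by
  simp [Nat.and_one_is_mod, Nat.shiftRight_eq_div_pow, Nat.testBit_eq_decide_div_mod_eq]

theorem inner_sctm (avail : List (Int × Int)) (score : Int) (c : Nat) (mm : Nat) :
    (PySem.List.pyRange 0 (mm : Int) 1).foldl (fun (p : Int × Int) i =>
        if (c >>> i.toNat) &&& 1 = 1 then
          let a := (PySem.List.pyGet? avail i).getD (0, 0)
          (p.1 + a.1, p.2 + a.2)
        else p) (score, 0)
      = (score + maskSc avail mm c, maskTm avail mm c) := by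
  induction mm with
  | zero =>
    rw [show ((0 : Nat) : Int) = 0 from rfl, PySem.List.pyRange_one_eq_nil le_rfl]
    simp [maskSc, maskTm]
  | succ mm ih =>
    rw [show ((mm + 1 : Nat) : Int) = (mm : Int) + 1 from by push_cast; ring,
      PySem.List.pyRange_one_succ_right (by positivity), List.foldl_append, ih]
    simp only [List.foldl_cons, List.foldl_nil, Int.toNat_natCast]
    by_cases hbit : c.testBit mm
    · rw [if_pos ((shift_and_one c mm).mpr hbit)]
      simp only [maskSc, maskTm, Finset.sum_range_succ, hbit, if_pos, pgetM, Prod.mk.injEq]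
      ring_nf
      trivial
    · rw [if_neg (by rw [shift_and_one c mm]; simp [hbit])]
      simp only [maskSc, maskTm, Finset.sum_range_succ, hbit, if_neg]
      simp

theorem inner_mark (c : Nat) (mm : Nat) (r : List Bool)
    (hidx : ∀ i : Nat, i < mm → c ||| 1 <<< i < r.length) :
    ((PySem.List.pyRange 0 (mm : Int) 1).foldl (fun r i =>
        if (c >>> i.toNat) &&& 1 = 1 then r
        else r.set (c ||| (1 <<< i.toNat)) true) r).length = r.length ∧
    ∀ T : Nat,
      (((PySem.List.pyRange 0 (mm : Int) 1).foldl (fun r i =>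
          if (c >>> i.toNat) &&& 1 = 1 then r
          else r.set (c ||| (1 <<< i.toNat)) true) r).getD T false = true
        ↔ (r.getD T false = true ∨ ∃ i, i < mm ∧ c.testBit i = false ∧ T = c ||| 1 <<< i)) := by
  induction mm with
  | zero =>
    rw [show ((0 : Nat) : Int) = 0 from rfl, PySem.List.pyRange_one_eq_nil le_rfl]
    simp
  | succ mm ih =>
    obtain ⟨ihlen, ihget⟩ := ih (fun i hi => hidx i (by omega))
    rw [show ((mm + 1 : Nat) : Int) = (mm : Int) + 1 from by push_cast; ring,
      PySem.List.pyRange_one_succ_right (by positivity), List.foldl_append]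
    simp only [List.foldl_cons, List.foldl_nil, Int.toNat_natCast]
    cases hbit : c.testBit mm with
    | true =>
      rw [if_pos ((shift_and_one c mm).mpr hbit)]
      refine ⟨ihlen, fun T => ?_⟩
      rw [ihget T]
      constructor
      · rintro (h | ⟨i, hi, hf, rfl⟩)
        · exact Or.inl h
        · exact Or.inr ⟨i, by omega, hf, rfl⟩
      · rintro (h | ⟨i, hi, hf, rfl⟩)
        · exact Or.inl h
        · have : i ≠ mm := fun he => by rw [he] at hf; rw [hbit] at hf; cases hf
          exact Or.inr ⟨i, by omega, hf, rfl⟩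
    | false =>
      rw [if_neg (by rw [shift_and_one c mm]; simp [hbit])]
      have hlt : c ||| 1 <<< mm < r.length := hidx mm (by omega)
      refine ⟨by rw [List.length_set, ihlen], fun T => ?_⟩
      rw [List.getD_eq_getElem?_getD]
      by_cases hT : T = c ||| 1 <<< mm
      · subst hT
        rw [List.getElem?_set_self (by rw [ihlen]; exact hlt)]
        simp only [Option.getD_some]
        constructor
        · intro _; exact Or.inr ⟨mm, by omega, hbit, rfl⟩
        · intro _; trivial
      · rw [List.getElem?_set_ne (fun he => hT he.symm), ← List.getD_eq_getElem?_getD, ihget T]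
        constructor
        · rintro (h | ⟨i, hi, hf, rfl⟩)
          · exact Or.inl h
          · exact Or.inr ⟨i, by omega, hf, rfl⟩
        · rintro (h | ⟨i, hi, hf, rfl⟩)
          · exact Or.inl h
          · have : i ≠ mm := fun he => by subst he; exact hT rfl
            exact Or.inr ⟨i, by omega, hf, rfl⟩

theorem loop_main (avail : List (Int × Int)) (k score : Int) (m : Nat) :
    ((List.range (2 ^ m)).foldl (fun (st : List Bool × Option Int) (S : Nat) =>
      if (st.1.getD S false) = false then st
      else
        let sctm := (PySem.List.pyRange 0 ((m : Nat) : Int) 1).foldl (fun (p : Int × Int) i =>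
            if (S >>> i.toNat) &&& 1 = 1 then
              let a := (PySem.List.pyGet? avail i).getD (0, 0)
              (p.1 + a.1, p.2 + a.2)
            else p) (score, 0)
        if k ≤ sctm.1 then
          (st.1, match st.2 with
                 | none => some sctm.2
                 | some b => if sctm.2 < b then some sctm.2 else some b)
        else
          ((PySem.List.pyRange 0 ((m : Nat) : Int) 1).foldl (fun r i =>
              if (S >>> i.toNat) &&& 1 = 1 then r
              else r.set (S ||| (1 <<< i.toNat)) true) st.1, st.2))
      ((List.replicate (2 ^ m) false).set 0 true, none)).2
    = optMinL (((List.range (2 ^ m)).filter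
        (fun S => (termsM avail k score m 0).contains S)).map (maskTm avail m)) := by
  suffices h : ∀ c : Nat, c ≤ 2 ^ m →
      (let st := (List.range c).foldl (fun (st : List Bool × Option Int) (S : Nat) =>
        if (st.1.getD S false) = false then st
        else
          let sctm := (PySem.List.pyRange 0 ((m : Nat) : Int) 1).foldl (fun (p : Int × Int) i =>
              if (S >>> i.toNat) &&& 1 = 1 then
                let a := (PySem.List.pyGet? avail i).getD (0, 0)
                (p.1 + a.1, p.2 + a.2)
              else p) (score, 0)
          if k ≤ sctm.1 then
            (st.1, match st.2 with
                   | none => some sctm.2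
                   | some b => if sctm.2 < b then some sctm.2 else some b)
          else
            ((PySem.List.pyRange 0 ((m : Nat) : Int) 1).foldl (fun r i =>
                if (S >>> i.toNat) &&& 1 = 1 then r
                else r.set (S ||| (1 <<< i.toNat)) true) st.1, st.2))
        ((List.replicate (2 ^ m) false).set 0 true, none)
      st.1.length = 2 ^ m ∧
      (∀ T : Nat, T < 2 ^ m →
        (st.1.getD T false = true ↔ (T = 0 ∨ ∃ U i : Nat, i < m ∧ U.testBit i = false ∧
          T = U ||| 1 <<< i ∧ U < c ∧ ReachP avail k score m U ∧ score + maskSc avail m U < k))) ∧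
      st.2 = optMinL (((List.range c).filter
        (fun S => (termsM avail k score m 0).contains S)).map (maskTm avail m))) by
    exact (h (2 ^ m) le_rfl).2.2
  intro c
  induction c with
  | zero =>
    intro _
    dsimp only [List.range_zero, List.foldl_nil]
    refine ⟨by simp, fun T hT => ?_, rfl⟩
    by_cases hT0 : T = 0
    · subst hT0
      rw [List.getD_eq_getElem?_getD, List.getElem?_set_self (by simpa using Nat.two_pow_pos m)]
      simp
    · rw [List.getD_eq_getElem?_getD, List.getElem?_set_ne (fun he => hT0 he.symm)]
      rw [List.getElem?_replicate, if_pos hT]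
      simp only [Option.getD_some]
      constructor
      · intro h; cases h
      · rintro (rfl | ⟨U, i, _, _, _, hUc, _⟩)
        · exact absurd rfl hT0
        · omega
  | succ c ihc =>
    intro hc1
    obtain ⟨hlen, hget, hbest⟩ := ihc (by omega)
    rw [List.range_succ, List.foldl_append, List.foldl_cons, List.foldl_nil]
    set st := (List.range c).foldl _ ((List.replicate (2 ^ m) false).set 0 true, none) with hst
    have hcsz : c < 2 ^ m := by omega
    have hiff : (st.1.getD c false = true) ↔ ReachP avail k score m c := by
      rw [hget c hcsz]
      constructor
      · rintro (rfl | ⟨U, i, him, hfree, rfl, hUc, hU, hlt⟩)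
        · exact ReachP.zero
        · exact ReachP.step U i hU him hfree hlt
      · intro h
        cases h with
        | zero => exact Or.inl rfl
        | step U i hU him hfree hlt =>
          refine Or.inr ⟨U, i, him, hfree, rfl, ?_, hU, hlt⟩
          have hle : U ≤ U ||| 1 <<< i := Nat.left_le_or
          have hne : U ≠ U ||| 1 <<< i := by
            intro he
            have hb : (U ||| 1 <<< i).testBit i = true := by
              rw [Nat.testBit_or, Nat.one_shiftLeft, Nat.testBit_two_pow_self]
              simp
            rw [← he, hfree] at hb
            cases hb
          omega
    by_cases hread : st.1.getD c false = false
    · rw [if_pos hread]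
      have hnreach : ¬ ReachP avail k score m c := by
        intro h
        rw [← hiff] at h
        rw [h] at hread
        cases hread
      refine ⟨hlen, fun T hT => ?_, ?_⟩
      · rw [hget T hT]
        constructor
        · rintro (rfl | ⟨U, i, him, hfree, rfl, hUc, hU, hlt⟩)
          · exact Or.inl rfl
          · exact Or.inr ⟨U, i, him, hfree, rfl, by omega, hU, hlt⟩
        · rintro (rfl | ⟨U, i, him, hfree, rfl, hUc, hU, hlt⟩)
          · exact Or.inl rfl
          · have hUc' : U < c := by
              rcases Nat.lt_succ_iff_lt_or_eq.mp hUc with h | rfl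
              · exact h
              · exact absurd hU hnreach
            exact Or.inr ⟨U, i, him, hfree, rfl, hUc', hU, hlt⟩
      · have hcont : ((termsM avail k score m 0).contains c) = false := by
          rw [List.contains_eq_mem]
          simp only [decide_eq_false_iff_not]
          intro hmem
          exact hnreach ((mem_termsM_zero avail k score m c).mp hmem).1
        rw [hbest, List.filter_append, List.filter_singleton, hcont]
        simp
    · rw [if_neg hread]
      have hreach : ReachP avail k score m c :=
        hiff.mp (by revert hread; cases st.1.getD c false <;> simp)
      rw [inner_sctm avail score c m]
      by_cases hks : k ≤ score + maskSc avail m c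
      · rw [if_pos hks]
        have hcont : ((termsM avail k score m 0).contains c) = true := by
          rw [List.contains_eq_mem]
          simp only [decide_eq_true_eq]
          exact (mem_termsM_zero avail k score m c).mpr ⟨hreach, hks⟩
        refine ⟨hlen, fun T hT => ?_, ?_⟩
        · rw [hget T hT]
          constructor
          · rintro (rfl | ⟨U, i, him, hfree, rfl, hUc, hU, hlt⟩)
            · exact Or.inl rfl
            · exact Or.inr ⟨U, i, him, hfree, rfl, by omega, hU, hlt⟩
          · rintro (rfl | ⟨U, i, him, hfree, rfl, hUc, hU, hlt⟩)
            · exact Or.inl rfl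
            · have hUc' : U < c := by
                rcases Nat.lt_succ_iff_lt_or_eq.mp hUc with h | rfl
                · exact h
                · omega
              exact Or.inr ⟨U, i, him, hfree, rfl, hUc', hU, hlt⟩
        · dsimp only
          have hupd : (match st.2 with
              | none => some (maskTm avail m c)
              | some b => if maskTm avail m c < b then some (maskTm avail m c) else some b)
              = optMin2 st.2 (some (maskTm avail m c)) := by
            cases st.2 with
            | none => rfl
            | some b =>
              simp only [optMin2, min_def]
              split_ifs <;> first
              | rfl
              | (simp only [Option.some.injEq]; omega)
          rw [hupd, hbest, List.filter_append, List.filter_singleton, hcont]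
          simp only [List.map_append, optMinL_append]
          congr 1
      · rw [if_neg hks]
        have hidx : ∀ i : Nat, i < m → c ||| 1 <<< i < st.1.length := by
          intro i hi
          rw [hlen]
          refine Nat.or_lt_two_pow hcsz ?_
          rw [Nat.one_shiftLeft]
          exact Nat.pow_lt_pow_right (by omega) hi
        obtain ⟨hmlen, hmget⟩ := inner_mark c m st.1 hidx
        have hcont : ((termsM avail k score m 0).contains c) = false := by
          rw [List.contains_eq_mem]
          simp only [decide_eq_false_iff_not]
          intro hmem
          exact hks ((mem_termsM_zero avail k score m c).mp hmem).2
        refine ⟨by rw [hmlen, hlen], fun T hT => ?_, ?_⟩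
        · rw [hmget T, hget T hT]
          constructor
          · rintro ((rfl | ⟨U, i, him, hfree, rfl, hUc, hU, hlt⟩) | ⟨i, hi, hf, rfl⟩)
            · exact Or.inl rfl
            · exact Or.inr ⟨U, i, him, hfree, rfl, by omega, hU, hlt⟩
            · exact Or.inr ⟨c, i, hi, hf, rfl, by omega, hreach, by omega⟩
          · rintro (rfl | ⟨U, i, him, hfree, rfl, hUc, hU, hlt⟩)
            · exact Or.inl (Or.inl rfl)
            · rcases Nat.lt_succ_iff_lt_or_eq.mp hUc with h | rfl
              · exact Or.inl (Or.inr ⟨U, i, him, hfree, rfl, h, hU, hlt⟩)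
              · exact Or.inr ⟨i, him, hfree, rfl⟩
        · rw [hbest, List.filter_append, List.filter_singleton, hcont]
          simp

theorem f_alt_loop (avail : List (Int × Int)) (k score : Int) :
    ((PySem.List.pyRange 0 ((2 ^ avail.length : Nat) : Int) 1).foldl (fun (st : List Bool × Option Int) S =>
      if (st.1.getD S.toNat false) = false then st
      else
        let sctm := (PySem.List.pyRange 0 ((avail.length : Nat) : Int) 1).foldl (fun (p : Int × Int) i =>
            if (S.toNat >>> i.toNat) &&& 1 = 1 then
              let a := (PySem.List.pyGet? avail i).getD (0, 0)
              (p.1 + a.1, p.2 + a.2)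
            else p) (score, 0)
        if k ≤ sctm.1 then
          (st.1, match st.2 with
                 | none => some sctm.2
                 | some b => if sctm.2 < b then some sctm.2 else some b)
        else
          ((PySem.List.pyRange 0 ((avail.length : Nat) : Int) 1).foldl (fun r i =>
              if (S.toNat >>> i.toNat) &&& 1 = 1 then r
              else r.set (S.toNat ||| (1 <<< i.toNat)) true) st.1, st.2))
      ((List.replicate (2 ^ avail.length) false).set 0 true, none)).2
    = optMinL (((List.range (2 ^ avail.length)).filter
        (fun S => termsM avail k score avail.length 0 |>.contains S)).map (maskTm avail avail.length)) := by
  rw [PySem.List.pyRange_zero_natCast (2 ^ avail.length), List.foldl_map]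
  simp only [Int.toNat_natCast]
  exact loop_main avail k score avail.length

-- ---- final assembly ----
theorem f_eq_f_alt (index score time : Int) (used : List Bool) (missions : List (Int × Int))
    (n k min_time : Int) :
    f index score time used missions n k min_time = f_alt index score time used missions n k min_time := by
  rw [f, fA_eq_bestL missions n k (used.length + 1) used index score time min_time
    (by have := freeIdxs_length_le used n; omega)]
  by_cases hks : k ≤ score
  · rw [bestL, if_pos hks, f_alt, if_pos hks]
    simp [combineMin]
  · simp only [f_alt, if_neg hks]
    rw [f_alt_loop (((PySem.List.pyRange 0 n 1).filter
        (fun i => !(PySem.List.pyGet? used i).getD true)).map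
        (fun i => (PySem.List.pyGet? missions i).getD (0, 0))) k score]
    set avail := (((PySem.List.pyRange 0 n 1).filter
        (fun i => !(PySem.List.pyGet? used i).getD true)).map
        (fun i => (PySem.List.pyGet? missions i).getD (0, 0))) with havail
    set m := avail.length with hm
    have hmatch : ∀ X : Option Int,
        (match X with | none => min_time | some b => min min_time (time + b))
          = combineMin min_time time X := fun X => by cases X <;> rfl
    rw [hmatch]
    have hL : avail = (freeIdxs used n).map (fun i => (PySem.List.pyGet? missions i).getD (0, 0)) := by
      rw [havail, freeIdxs]
    have hmL : (freeIdxs used n).length = m := by rw [hm, hL, List.length_map]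
    have hLnd : (freeIdxs used n).Nodup :=
      List.Nodup.filter _ (PySem.List.nodup_pyRange_one 0 n)
    -- relabel original indices to positions 0..m-1
    have hJmap : (PySem.List.pyRange 0 (m : Int) 1).map
        (fun j : Int => (freeIdxs used n).getD j.toNat 0) = freeIdxs used n := by
      apply List.ext_getElem
      · rw [List.length_map, PySem.List.length_pyRange_one]; omega
      · intro t h1 h2
        rw [List.getElem_map, PySem.List.getElem_pyRange_one 0 (m : Int) t
          (by rwa [List.length_map] at h1)]
        simp only [zero_add, Int.toNat_natCast]
        exact List.getD_eq_getElem _ 0 h2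
    have hinj : ∀ a ∈ PySem.List.pyRange 0 (m : Int) 1, ∀ b ∈ PySem.List.pyRange 0 (m : Int) 1,
        (freeIdxs used n).getD a.toNat 0 = (freeIdxs used n).getD b.toNat 0 → a = b := by
      intro a ha b hb heq
      have ha' := PySem.List.mem_pyRange_one.mp ha
      have hb' := PySem.List.mem_pyRange_one.mp hb
      have hal : a.toNat < (freeIdxs used n).length := by omega
      have hbl : b.toNat < (freeIdxs used n).length := by omega
      rw [List.getD_eq_getElem _ 0 hal, List.getD_eq_getElem _ 0 hbl] at heq
      have := (List.Nodup.getElem_inj_iff hLnd).mp heq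
      omega
    have hpay : ∀ i ∈ PySem.List.pyRange 0 (m : Int) 1,
        pgetM missions ((freeIdxs used n).getD i.toNat 0) = pgetM avail i := by
      intro i hi
      have hi' := PySem.List.mem_pyRange_one.mp hi
      have hil : i.toNat < (freeIdxs used n).length := by omega
      simp only [pgetM]
      rw [List.getD_eq_getElem _ 0 hil, PySem.List.pyGet?_of_nonneg avail hi'.1, hL,
        List.getElem?_map, List.getElem?_eq_getElem hil]
      rfl
    have hrelab := bestL_map missions avail k (fun j : Int => (freeIdxs used n).getD j.toNat 0)
      (PySem.List.pyRange 0 (m : Int) 1) score hinj hpay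
    rw [hJmap] at hrelab
    -- the free-index list of the empty mask is exactly 0..m-1
    have hfree0 : freeInts m 0 = PySem.List.pyRange 0 (m : Int) 1 := by
      rw [freeInts, freeBitsN, PySem.List.pyRange_zero_natCast]
      congr 1
      apply List.filter_eq_self.mpr
      intro a _
      simp [Nat.zero_testBit]
    have hsc0 : maskSc avail m 0 = 0 := by simp [maskSc, Nat.zero_testBit]
    have htm0 : maskTm avail m 0 = 0 := by simp [maskTm, Nat.zero_testBit]
    have hterm := bestL_eq_termsM avail k score m 0
    rw [hfree0, hsc0, add_zero, htm0] at hterm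
    simp only [sub_zero] at hterm
    rw [hrelab, hterm]
    -- the DP's filtered range and the search's terminal list have the same members
    congr 1
    apply optMinL_congr_mem
    intro x
    constructor
    · intro hx
      obtain ⟨S, hS, rfl⟩ := List.mem_map.mp hx
      refine List.mem_map.mpr ⟨S, List.mem_filter.mpr ⟨?_, ?_⟩, rfl⟩
      · exact List.mem_range.mpr (ReachP_lt avail k score m S
          ((mem_termsM_zero avail k score m S).mp hS).1)
      · rw [List.contains_eq_mem]; simpa using hS
    · intro hx
      obtain ⟨S, hS, rfl⟩ := List.mem_map.mp hx
      have := (List.mem_filter.mp hS).2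
      rw [List.contains_eq_mem] at this
      exact List.mem_map.mpr ⟨S, by simpa using this, rfl⟩

-- ===== VERDICT (by name: the statement is the Claim_ definition above) =====
theorem f_spec : Claim_equal_f := by
  intro index score time used missions n k min_time _ _
  unfold Spec_f
  exact f_eq_f_alt index score time used missions n k min_time
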